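-- pv_equiv track=rewrite | github.com/ChipFlow/coriolis | crlcore/python/helpers/__init__.py | overload
-- ===== SOURCE A (Python) =====
-- def overload ( defaultParameters, parameters ):
--     overloads          = {}
--     overloadParameters = []
--     for parameter in parameters:
--         overloads[ parameter[0] ] = parameter
--     for parameter in defaultParameters:
--         if parameter[0] in overloads:
--             overloadParameters.append( overloads[parameter[0]] )
--         else:
--             overloadParameters.append( parameter )
--     return tuple(overloadParameters)
-- ===== SOURCE B (Python) =====
-- def overload(defaultParameters, parameters):
--     # Successive substitution: start from the defaults and let each provided
--     # parameter overwrite every entry with the same key; later ones win.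
--     result = list(defaultParameters)
--     for p in parameters:
--         result = [p if d[0] == p[0] else d for d in result]
--     return tuple(result)
-- ===== Notes on version B (the rewrite author's own statement) =====
-- stated objective: alternative
-- what changed: B inverts the traversal: instead of indexing the provided parameters and then walking the defaults, it starts from the defaults list and folds over the provided parameters, each one rewriting in place every accumulated entry with the same key, so last-wins falls out of the fold order with no dict and no per-default search.
import Mathlib
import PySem

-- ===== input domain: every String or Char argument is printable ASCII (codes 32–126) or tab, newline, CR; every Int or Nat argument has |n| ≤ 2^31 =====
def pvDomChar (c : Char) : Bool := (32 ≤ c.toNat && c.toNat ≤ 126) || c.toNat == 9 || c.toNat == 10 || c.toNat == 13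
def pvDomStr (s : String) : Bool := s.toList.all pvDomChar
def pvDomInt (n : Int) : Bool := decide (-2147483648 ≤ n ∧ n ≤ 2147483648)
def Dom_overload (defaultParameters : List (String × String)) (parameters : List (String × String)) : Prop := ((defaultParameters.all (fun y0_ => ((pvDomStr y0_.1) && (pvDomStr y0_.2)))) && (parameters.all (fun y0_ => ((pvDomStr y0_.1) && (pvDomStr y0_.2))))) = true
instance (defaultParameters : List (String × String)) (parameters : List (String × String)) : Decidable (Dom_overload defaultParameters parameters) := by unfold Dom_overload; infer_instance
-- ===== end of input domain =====

-- ===== PORT A =====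
-- B replaces A's dict-index-then-walk with a fold over the provided parameters
-- that rewrites matching entries of the defaults list in place (alternative decomposition; same result).
def overload (defaultParameters : List (String × String)) (parameters : List (String × String)) : List (String × String) :=
  let overloads : PySem.Dict String (String × String) :=
    parameters.foldl (fun d p => d.insert p.1 p) PySem.Dict.empty
  defaultParameters.foldl
    (fun acc p =>
      if overloads.contains p.1 then acc ++ [overloads.getD p.1 p]
      else acc ++ [p]) []

-- ===== PORT B =====
def overload_alt (defaultParameters : List (String × String)) (parameters : List (String × String)) : List (String × String) :=
  parameters.foldl
    (fun res p => res.map (fun d => if d.1 == p.1 then p else d))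
    defaultParameters

-- ===== PRECONDITION & SPEC =====
def Spec_overload (defaultParameters : List (String × String)) (parameters : List (String × String)) (out : List (String × String)) : Prop := out = overload_alt defaultParameters parameters
instance (defaultParameters : List (String × String)) (parameters : List (String × String)) (out : List (String × String)) : Decidable (Spec_overload defaultParameters parameters out) := by unfold Spec_overload; infer_instance

-- ===== CLAIM (what is proved, stated in full; the proofs are below) =====
def Claim_equal_overload : Prop := ∀ (defaultParameters : List (String × String)) (parameters : List (String × String)), Dom_overload defaultParameters parameters → Spec_overload defaultParameters parameters (overload defaultParameters parameters)

-- ===== LEMMAS AND PROOFS =====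

lemma foldl_eq_map {α β : Type} (step : List β → α → List β) (g : α → β)
    (h : ∀ acc p, step acc p = acc ++ [g p]) :
    ∀ (l : List α) (acc : List β), l.foldl step acc = acc ++ l.map g := by
  intro l
  induction l with
  | nil => intro acc; simp
  | cons x xs ih => intro acc; simp [List.foldl, h, ih]

lemma get?_foldl_insert_eq_find?_reverse (k : String) :
    ∀ (l : List (String × String)) (d : PySem.Dict String (String × String)),
      (l.foldl (fun d p => d.insert p.1 p) d).get? k =
        match l.reverse.find? (fun q => q.1 == k) with
        | some q => some q
        | none   => d.get? k := by
  intro l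
  induction l with
  | nil => intro d; simp
  | cons x xs ih =>
    intro d
    rw [List.foldl_cons, ih, List.reverse_cons, List.find?_append]
    cases hfind : xs.reverse.find? (fun q => q.1 == k) with
    | some q => simp
    | none =>
      simp only [Option.none_or, List.find?]
      by_cases hk : x.1 = k
      · simp [hk, PySem.Dict.get?_insert_self]
      · have hb : (x.1 == k) = false := beq_false_of_ne hk
        simp [hb, PySem.Dict.get?_insert, Ne.symm hk]

-- folding a map over the list = mapping a per-element fold
lemma foldl_map_comm {α β : Type} (h : α → β → β) :
    ∀ (l : List α) (init : List β),
      l.foldl (fun res p => res.map (h p)) init =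
        init.map (fun d => l.foldl (fun s p => h p s) d) := by
  intro l
  induction l with
  | nil => intro init; simp
  | cons x xs ih =>
    intro init
    rw [List.foldl_cons, ih, List.map_map]
    simp [Function.comp]

-- the per-element fold computes the last match in parameters (else the default)
lemma foldl_subst_eq_find?_reverse :
    ∀ (l : List (String × String)) (d : String × String),
      l.foldl (fun s p => if s.1 == p.1 then p else s) d =
        match l.reverse.find? (fun q => q.1 == d.1) with
        | some q => q
        | none   => d := by
  intro l
  induction l with
  | nil => intro d; simp
  | cons x xs ih =>
    intro d
    rw [List.foldl_cons, List.reverse_cons, List.find?_append]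
    by_cases hk : d.1 = x.1
    · have hb : (d.1 == x.1) = true := beq_iff_eq.2 hk
      rw [if_pos hb, ih]
      cases hfind : xs.reverse.find? (fun q => q.1 == x.1) with
      | some q => simp [hfind, hk]
      | none => simp [hfind, hk, List.find?]
    · have hb : (d.1 == x.1) = false := beq_false_of_ne hk
      rw [if_neg (by simp [hb]), ih]
      cases hfind : xs.reverse.find? (fun q => q.1 == d.1) with
      | some q => simp
      | none =>
        have hbx : (x.1 == d.1) = false := beq_false_of_ne (Ne.symm hk)
        simp [List.find?, hbx]

theorem overload_spec : Claim_equal_overload := by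
  intro defaultParameters parameters _
  unfold Spec_overload overload overload_alt
  simp only []
  rw [foldl_eq_map _
        (fun p => if (parameters.foldl (fun d p => d.insert p.1 p) PySem.Dict.empty).contains p.1
                  then (parameters.foldl (fun d p => d.insert p.1 p) PySem.Dict.empty).getD p.1 p
                  else p)
        (by intro acc p
            by_cases hc : (parameters.foldl (fun d p => d.insert p.1 p) PySem.Dict.empty).contains p.1 <;> simp [hc]),
      foldl_map_comm]
  simp only [List.nil_append]
  apply List.map_congr_left
  intro p _
  rw [foldl_subst_eq_find?_reverse]
  have h := get?_foldl_insert_eq_find?_reverse p.1 parameters PySem.Dict.empty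
  cases hfind : parameters.reverse.find? (fun q => q.1 == p.1) with
  | some q =>
    rw [hfind] at h
    simp only at h
    have hc : (parameters.foldl (fun d p => d.insert p.1 p) PySem.Dict.empty).contains p.1 = true := by
      rw [PySem.Dict.contains_eq_isSome_get?, h]; rfl
    simp [hc, PySem.Dict.getD_eq_get?_getD, h]
  | none =>
    rw [hfind] at h
    simp only [PySem.Dict.get?_empty] at h
    have hc : (parameters.foldl (fun d p => d.insert p.1 p) PySem.Dict.empty).contains p.1 = false := by
      rw [PySem.Dict.contains_eq_isSome_get?, h]; rfl
    simp [hc]
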